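-- pv_equiv track=rewrite | github.com/Hesen58/holbertonschool-higher_level_programming | python-data_structures/4-new_in_list.py | new_in_list
-- ===== SOURCE A (Python) =====
-- def new_in_list(my_list, idx, element):
--     if idx < 0 or idx >= len(my_list):
--         return my_list
--     zor = []
--     for i in range(len(my_list)):
--         zor.append(my_list[i])
--     zor[idx] = element
--     return zor
-- ===== SOURCE B (Python) =====
-- def new_in_list(my_list, idx, element):
--     if idx < 0 or idx >= len(my_list):
--         return my_list
--     return _replace(my_list, idx, element)
--
--
-- def _replace(lst, k, element):
--     """Divide and conquer: split the list in half and recurse into the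
--     half containing position k; depth is O(log n)."""
--     if len(lst) == 1:
--         return [element]
--     mid = len(lst) // 2
--     if k < mid:
--         return _replace(lst[:mid], k, element) + lst[mid:]
--     return lst[:mid] + _replace(lst[mid:], k - mid, element)
-- ===== Notes on version B (the rewrite author's own statement) =====
-- stated objective: alternative
-- what changed: Replaced the element-by-element copy loop followed by index reassignment with a divide-and-conquer recursion that halves the list and recurses only into the half containing the replacement index, reassembling the halves with concatenation.
import Mathlib
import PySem

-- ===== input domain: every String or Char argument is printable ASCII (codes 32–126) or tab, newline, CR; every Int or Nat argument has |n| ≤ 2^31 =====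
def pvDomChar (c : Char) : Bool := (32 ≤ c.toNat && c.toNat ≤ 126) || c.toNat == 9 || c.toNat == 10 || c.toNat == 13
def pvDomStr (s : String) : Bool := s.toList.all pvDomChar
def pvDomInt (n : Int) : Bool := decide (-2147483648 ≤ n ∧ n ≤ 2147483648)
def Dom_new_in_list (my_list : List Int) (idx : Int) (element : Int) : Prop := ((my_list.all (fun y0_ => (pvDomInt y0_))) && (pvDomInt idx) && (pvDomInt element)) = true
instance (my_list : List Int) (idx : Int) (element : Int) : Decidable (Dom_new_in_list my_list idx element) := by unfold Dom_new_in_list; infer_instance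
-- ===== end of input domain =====

-- B replaces A's full element-by-element copy loop plus index reassignment with a
-- divide-and-conquer recursion that halves the list and recurses only into the half
-- containing the index (objective: alternative).

-- ===== PORT A =====
def new_in_list (my_list : List Int) (idx : Int) (element : Int) : List Int :=
  if idx < 0 ∨ idx ≥ (my_list.length : Int) then my_list
  else
    let zor := (PySem.List.pyRange 0 (my_list.length : Int) 1).foldl
      (fun acc i => acc ++ [PySem.List.pyGetD my_list i 0]) []
    PySem.List.pySetD zor idx element

-- ===== PORT B =====
-- _replace in Source B: divide-and-conquer recursion on halves; the fuel parameter
-- (initialised to the list length, an upper bound on the recursion) only makes the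
-- recursion structural — it is never exhausted on the inputs the function reaches.
def pvReplace (fuel : Nat) (lst : List Int) (k : Int) (element : Int) : List Int :=
  match fuel with
  | 0 => lst
  | fuel + 1 =>
    if lst.length = 1 then [element]
    else
      let mid := PySem.Int.floordiv (lst.length : Int) 2
      if k < mid then
        pvReplace fuel (PySem.List.slice lst none (some mid)) k element ++
          PySem.List.slice lst (some mid) none
      else
        PySem.List.slice lst none (some mid) ++
          pvReplace fuel (PySem.List.slice lst (some mid) none) (k - mid) element

def new_in_list_alt (my_list : List Int) (idx : Int) (element : Int) : List Int :=
  if idx < 0 ∨ idx ≥ (my_list.length : Int) then my_list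
  else pvReplace my_list.length my_list idx element

-- ===== PRECONDITION & SPEC =====
def Spec_new_in_list (my_list : List Int) (idx : Int) (element : Int) (out : List Int) : Prop := out = new_in_list_alt my_list idx element
instance (my_list : List Int) (idx : Int) (element : Int) (out : List Int) : Decidable (Spec_new_in_list my_list idx element out) := by unfold Spec_new_in_list; infer_instance

-- ===== CLAIM (what is proved, stated in full; the proofs are below) =====
def Claim_equal_new_in_list : Prop := ∀ (my_list : List Int) (idx : Int) (element : Int), Dom_new_in_list my_list idx element → Spec_new_in_list my_list idx element (new_in_list my_list idx element)

-- ===== LEMMAS AND PROOFS =====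

theorem set_eq_take_append_cons_drop (l : List Int) (n : Nat) (a : Int) (h : n < l.length) :
    l.set n a = l.take n ++ a :: l.drop (n + 1) := by
  induction l generalizing n with
  | nil => simp at h
  | cons x xs ih =>
    cases n with
    | zero => simp
    | succ m =>
      simp only [List.set, List.take, List.drop, List.cons_append]
      congr 1
      exact ih m (by simpa using h)

theorem pvReplace_eq (fuel : Nat) : ∀ (lst : List Int) (k element : Int),
    lst.length ≤ fuel → 0 ≤ k → k < (lst.length : Int) →
    pvReplace fuel lst k element = lst.take k.toNat ++ element :: lst.drop (k.toNat + 1) := by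
  induction fuel with
  | zero => intro lst k element hf h0 hk; omega
  | succ fuel ih =>
    intro lst k element hf h0 hk
    by_cases h1 : lst.length = 1
    · have hk0 : k = 0 := by omega
      match lst, h1 with
      | [x], _ => simp [pvReplace, hk0]
    · have hlen2 : 2 ≤ lst.length := by omega
      have hmid : PySem.Int.floordiv (lst.length : Int) 2 = ((lst.length / 2 : Nat) : Int) := by
        rw [PySem.Int.floordiv_eq_ediv_of_pos (by omega)]
        push_cast [Int.natCast_div]; ring
      set m : Nat := lst.length / 2 with hm
      have hm1 : 1 ≤ m := by omega
      have hmlt : m < lst.length := by omega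
      rw [pvReplace, if_neg h1]
      simp only [hmid]
      rw [PySem.List.slice_to_natCast, PySem.List.slice_from_natCast]
      by_cases hcase : k < ((m : Nat) : Int)
      · rw [if_pos hcase]
        have hklt : k.toNat < m := by omega
        rw [ih (lst.take m) k element (by simp; omega) h0 (by simp; omega)]
        rw [List.take_take, min_eq_left (by omega)]
        rw [List.drop_take]
        have : lst.drop m = ((lst.drop (k.toNat + 1)).drop (m - (k.toNat + 1))) := by
          rw [List.drop_drop]; congr 1; omega
        rw [this]
        simp
      · rw [if_neg hcase]
        rw [not_lt] at hcase
        have hsub : (k - (m : Int)).toNat = k.toNat - m := by omega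
        rw [ih (lst.drop m) (k - m) element (by simp; omega) (by omega) (by simp; omega)]
        rw [hsub]
        have h1' : lst.take k.toNat = lst.take m ++ (lst.drop m).take (k.toNat - m) := by
          rw [← List.take_add]; congr 1; omega
        have h2' : (lst.drop m).drop (k.toNat - m + 1) = lst.drop (k.toNat + 1) := by
          rw [List.drop_drop]; congr 1; omega
        rw [h1', h2']
        simp

-- ===== VERDICT (by name: the statement is the Claim_ definition above) =====
theorem new_in_list_spec : Claim_equal_new_in_list := by
  intro my_list idx element _
  unfold Spec_new_in_list new_in_list new_in_list_alt
  by_cases hg : idx < 0 ∨ idx ≥ (my_list.length : Int)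
  · simp [hg]
  · rw [not_or] at hg; simp only [not_lt, ge_iff_le, not_le] at hg
    obtain ⟨h0, hlt⟩ := hg
    rw [if_neg (by omega), if_neg (by omega)]
    rw [PySem.List.foldl_append_singleton_eq_map, PySem.List.map_pyGetD_pyRange_zero']
    simp only [List.nil_append]
    rw [PySem.List.pySetD_of_nonneg my_list element h0]
    rw [pvReplace_eq my_list.length my_list idx element (le_refl _) h0 hlt]
    have hidx : idx.toNat < my_list.length := by omega
    exact set_eq_take_append_cons_drop _ _ _ hidx
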